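-- pv_equiv track=rewrite | github.com/Diddly1/Viikko7projekti | BackEnd.py | puuttuuko_tyoaikoja
-- ===== SOURCE A (Python) =====
-- def puuttuuko_tyoaikoja(lista: list):
--
--     projektiinLiitetyt = ['Ville', 'Anna', 'Mike', 'Pietari']
--     nimet = []
--     kirjaus_puuttuu = []
--
--     for arvo in lista:
--         nimet.append(arvo[1])
--
--     for arvo in projektiinLiitetyt:
--         if arvo not in nimet:
--             kirjaus_puuttuu.append(arvo)
--
--     return kirjaus_puuttuu
-- ===== SOURCE B (Python) =====
-- def puuttuuko_tyoaikoja(lista: list):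
--     # Maintain the answer directly: start from the four expected names and
--     # filter out each name as it is seen, returning the survivors.
--     remaining = ['Ville', 'Anna', 'Mike', 'Pietari']
--     for arvo in lista:
--         n = arvo[1]
--         remaining = [m for m in remaining if m != n]
--     return remaining
-- ===== Notes on version B (the rewrite author's own statement) =====
-- stated objective: simpler
-- what changed: Instead of collecting all seen names into a list and then scanning it once per expected name, B keeps the answer itself as the accumulator: a single pass filters each seen name out of the ordered 4-element 'remaining' list, which is returned directly with no second pass and no collection of seen names.
import Mathlib
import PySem

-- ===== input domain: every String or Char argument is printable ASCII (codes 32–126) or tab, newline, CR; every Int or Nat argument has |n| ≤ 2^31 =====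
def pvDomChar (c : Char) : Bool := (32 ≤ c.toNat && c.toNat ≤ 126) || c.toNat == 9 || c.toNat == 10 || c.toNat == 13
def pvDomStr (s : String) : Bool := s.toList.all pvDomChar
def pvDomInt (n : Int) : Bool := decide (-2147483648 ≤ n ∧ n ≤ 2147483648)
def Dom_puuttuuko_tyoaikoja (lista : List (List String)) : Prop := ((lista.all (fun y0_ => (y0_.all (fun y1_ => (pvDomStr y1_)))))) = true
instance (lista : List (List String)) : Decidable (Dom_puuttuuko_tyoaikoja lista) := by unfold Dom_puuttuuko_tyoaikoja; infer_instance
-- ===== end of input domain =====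

-- B keeps the answer itself as the accumulator: one pass filters each seen name out of the ordered
-- 4-element remaining list, returned directly (simpler decomposition; not claimed faster).
-- ===== PORT A =====
def puuttuuko_tyoaikoja (lista : List (List String)) : List String :=
  let projektiinLiitetyt := ["Ville", "Anna", "Mike", "Pietari"]
  let nimet := lista.foldl (fun acc arvo => acc ++ [PySem.List.pyGetD arvo 1 ""]) ([] : List String)
  let kirjaus_puuttuu := projektiinLiitetyt.foldl
    (fun acc arvo => if arvo ∈ nimet then acc else acc ++ [arvo]) ([] : List String)
  kirjaus_puuttuu

-- ===== PORT B =====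
def puuttuuko_tyoaikoja_alt (lista : List (List String)) : List String :=
  lista.foldl
    (fun remaining arvo =>
      let n := PySem.List.pyGetD arvo 1 ""
      remaining.filter (fun m => m ≠ n))
    ["Ville", "Anna", "Mike", "Pietari"]

-- ===== PRECONDITION & SPEC =====
-- Pre_ excludes exactly the inputs where 'arvo[1]' raises IndexError in both programs: some row shorter than 2.
def Pre_puuttuuko_tyoaikoja (lista : List (List String)) : Prop :=
  ∀ arvo ∈ lista, 2 ≤ arvo.length
instance (lista : List (List String)) : Decidable (Pre_puuttuuko_tyoaikoja lista) := by
  unfold Pre_puuttuuko_tyoaikoja; infer_instance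
def pvWitness_puuttuuko_tyoaikoja : List (List String) := [["1", "Anna"], ["2", "Bob"]]

def Spec_puuttuuko_tyoaikoja (lista : List (List String)) (out : List String) : Prop := out = puuttuuko_tyoaikoja_alt lista
instance (lista : List (List String)) (out : List String) : Decidable (Spec_puuttuuko_tyoaikoja lista out) := by unfold Spec_puuttuuko_tyoaikoja; infer_instance

-- ===== CLAIM (what is proved, stated in full; the proofs are below) =====
def Claim_equal_puuttuuko_tyoaikoja : Prop := ∀ (lista : List (List String)), Dom_puuttuuko_tyoaikoja lista → Pre_puuttuuko_tyoaikoja lista → Spec_puuttuuko_tyoaikoja lista (puuttuuko_tyoaikoja lista)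

-- ===== LEMMAS AND PROOFS =====

-- B's running filter equals one filter by 'not among the seen names'
theorem fold_filter_eq {α : Type} [DecidableEq α] (f : List α → α)
    (lista : List (List α)) (s : List α) :
    lista.foldl (fun r arvo => r.filter (fun m => m ≠ f arvo)) s
      = s.filter (fun m => m ∉ lista.map f) := by
  induction lista generalizing s with
  | nil => simp
  | cons a t ih =>
    simp only [List.foldl_cons, ih, List.filter_filter, List.map_cons, List.mem_cons]
    apply List.filter_congr
    intro x _
    by_cases h1 : x = f a <;> simp [h1]

-- ===== VERDICT (by name: the statement is the Claim_ definition above) =====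
theorem puuttuuko_tyoaikoja_spec : Claim_equal_puuttuuko_tyoaikoja := by
  intro lista _hDom _hPre
  unfold Spec_puuttuuko_tyoaikoja puuttuuko_tyoaikoja puuttuuko_tyoaikoja_alt
  simp only [fold_filter_eq, PySem.List.foldl_append_singleton_eq_map, List.nil_append]
  rw [show (fun acc arvo => if arvo ∈ lista.map (fun arvo => PySem.List.pyGetD arvo 1 "") then acc else acc ++ [arvo])
        = (fun (acc : List String) arvo => if arvo ∉ lista.map (fun arvo => PySem.List.pyGetD arvo 1 "") then acc ++ [arvo] else acc) from by
      funext acc arvo; by_cases h : arvo ∈ lista.map (fun arvo => PySem.List.pyGetD arvo 1 "") <;> simp [h]]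
  simpa using PySem.List.foldl_append_if_eq_filter
    (l := ["Ville", "Anna", "Mike", "Pietari"])
    (p := fun m => m ∉ lista.map (fun arvo => PySem.List.pyGetD arvo 1 "")) (acc := [])
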